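-- pv_equiv track=rewrite | github.com/jonnydh/advent_of_code | 2021/day3/part1.py | calculate_epsilon
-- ===== SOURCE A (Python) =====
-- def most_common_value_at_pos(report, position):
--     report_length = len(report)
--     zeros = len([line[position] for line in report if line[position] == '0'])
--     ones = report_length - zeros
--
--     if zeros > ones:
--         return '0'
--     elif ones > zeros:
--         return '1'
--     else:
--         return 'tie'
--
-- def calculate_epsilon(report):
--     epsilon = ''
--     for pos in range(len(report[0])):
--         if most_common_value_at_pos(report,pos) == '1':
--             epsilon += '0'
--         else:
--             epsilon += '1'
--     return epsilon
-- ===== SOURCE B (Python) =====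
-- def calculate_epsilon(report):
--     counts = [0] * len(report[0])
--     for line in report:
--         for pos in range(len(counts)):
--             if line[pos] == '0':
--                 counts[pos] += 1
--     n = len(report)
--     epsilon = ''
--     for zeros in counts:
--         epsilon += '0' if n - zeros > zeros else '1'
--     return epsilon
-- ===== Notes on version B (the rewrite author's own statement) =====
-- stated objective: alternative
-- what changed: A makes one full scan of the report per bit position (building a filtered list each time); B builds a per-position zero-count table in a single accumulating pass over the lines and then reconstructs epsilon from the table in a second pass.
import Mathlib
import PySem

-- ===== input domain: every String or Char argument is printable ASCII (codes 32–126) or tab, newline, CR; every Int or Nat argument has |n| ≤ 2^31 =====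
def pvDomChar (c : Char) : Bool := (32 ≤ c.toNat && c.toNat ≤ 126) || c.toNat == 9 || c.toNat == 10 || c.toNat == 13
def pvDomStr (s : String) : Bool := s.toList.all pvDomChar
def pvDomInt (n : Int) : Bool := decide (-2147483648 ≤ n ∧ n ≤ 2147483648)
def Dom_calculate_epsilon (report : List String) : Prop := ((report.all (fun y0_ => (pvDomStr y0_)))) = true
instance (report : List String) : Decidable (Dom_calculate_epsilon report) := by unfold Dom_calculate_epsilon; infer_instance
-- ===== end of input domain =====

-- B replaces A's per-position rescan of every line by one accumulating pass that
-- builds a per-position zero-count table, plus a reconstruction pass over the table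
-- (objective: alternative decomposition, same asymptotic cost).

-- ===== PORT A =====
-- '[line[position] for line in report if line[position] == '0']'; none = IndexError on a too-short line
def pvZeroList (report : List String) (position : Int) : Option (List Char) :=
  match report with
  | [] => some []
  | l :: rest =>
    match PySem.Str.pyGet? l position with
    | none => none
    | some c =>
      match pvZeroList rest position with
      | none => none
      | some cs => some (if c == '0' then c :: cs else cs)

def most_common_value_at_pos (report : List String) (position : Int) : Option String :=
  let report_length := report.length
  match pvZeroList report position with
  | none => none
  | some zs =>
    let zeros := zs.length
    let ones := report_length - zeros
    some (if zeros > ones then "0" else if ones > zeros then "1" else "tie")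

def calculate_epsilon (report : List String) : String :=
  match PySem.List.pyGet? report 0 with
  | none => ""   -- report[0] raised IndexError; excluded by Pre_
  | some first =>
    match (PySem.List.pyRange 0 (PySem.Str.len first) 1).foldl
      (fun acc pos =>
        match acc with
        | none => none
        | some eps =>
          match most_common_value_at_pos report pos with
          | none => none   -- IndexError inside the helper; excluded by Pre_
          | some m => some (eps ++ (if m == "1" then ['0'] else ['1'])))
      (some ([] : List Char)) with
    | none => ""
    | some eps => String.ofList eps

-- ===== PORT B =====
-- inner loop 'for pos in range(len(counts)): if line[pos] == '0': counts[pos] += 1':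
-- pos walks counts and line in step; none = IndexError when the line is shorter than counts
def pvBump (counts : List Nat) (cs : List Char) : Option (List Nat) :=
  match counts, cs with
  | [], _ => some []
  | _ :: _, [] => none
  | k :: ks, c :: rest =>
    match pvBump ks rest with
    | none => none
    | some ks' => some ((if c == '0' then k + 1 else k) :: ks')

def calculate_epsilon_alt (report : List String) : String :=
  match report with
  | [] => ""   -- report[0] raised IndexError; excluded by Pre_
  | first :: _ =>
    let init : List Nat := List.replicate first.toList.length 0
    match report.foldl
        (fun acc line =>
          match acc with
          | none => none
          | some counts => pvBump counts line.toList)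
        (some init) with
    | none => ""   -- IndexError on a too-short line; excluded by Pre_
    | some counts =>
      let n := report.length
      String.ofList (counts.foldl
        (fun eps zeros => eps ++ [if n - zeros > zeros then '0' else '1']) [])

-- ===== PRECONDITION & SPEC =====
-- Pre_ is exactly where Python A returns: a nonempty report whose every line is at
-- least as long as the first (otherwise line[position] raises IndexError).
def Pre_calculate_epsilon (report : List String) : Prop :=
  report ≠ [] ∧ ∀ l ∈ report, PySem.Str.len (report.headD "") ≤ PySem.Str.len l
instance (report : List String) : Decidable (Pre_calculate_epsilon report) := by
  unfold Pre_calculate_epsilon; infer_instance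

def pvWitness_calculate_epsilon : List String := ["01", "10", "00"]

def Spec_calculate_epsilon (report : List String) (out : String) : Prop := out = calculate_epsilon_alt report
instance (report : List String) (out : String) : Decidable (Spec_calculate_epsilon report out) := by unfold Spec_calculate_epsilon; infer_instance

-- ===== CLAIM (what is proved, stated in full; the proofs are below) =====
def Claim_equal_calculate_epsilon : Prop := ∀ (report : List String), Dom_calculate_epsilon report → Pre_calculate_epsilon report → Spec_calculate_epsilon report (calculate_epsilon report)

-- ===== LEMMAS AND PROOFS =====

-- number of lines whose character at position p is '0'
def pvZ (report : List String) (p : Nat) : Nat :=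
  report.countP (fun l => l.toList[p]? == some '0')

theorem pvZeroList_ex (report : List String) (p : Nat)
    (h : ∀ l ∈ report, p < l.toList.length) :
    ∃ zs, pvZeroList report (p : Int) = some zs ∧ zs.length = pvZ report p := by
  induction report with
  | nil => exact ⟨[], rfl, rfl⟩
  | cons l rest ih =>
    obtain ⟨zs, hz, hl⟩ := ih (fun x hx => h x (List.mem_cons_of_mem _ hx))
    have hp : p < l.toList.length := h l (List.mem_cons_self ..)
    refine ⟨if l.toList[p] == '0' then l.toList[p] :: zs else zs, ?_, ?_⟩
    · simp [pvZeroList, PySem.Str.pyGet?_eq, List.getElem?_eq_getElem hp, hz]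
    · by_cases h0 : l.toList[p] = '0' <;>
        simp [pvZ, h0, hl, List.getElem?_eq_getElem hp]

theorem mcvap_eq (report : List String) (p : Nat)
    (h : ∀ l ∈ report, p < l.toList.length) :
    most_common_value_at_pos report (p : Int) =
      some (if pvZ report p > report.length - pvZ report p then "0"
            else if report.length - pvZ report p > pvZ report p then "1" else "tie") := by
  obtain ⟨zs, hz, hl⟩ := pvZeroList_ex report p h
  simp [most_common_value_at_pos, hz, hl]

-- the character A appends at position p
def pvChar (report : List String) (p : Nat) : Char :=
  if report.length - pvZ report p > pvZ report p then '0' else '1'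

theorem foldA (report : List String) (m : Nat) (h : ∀ l ∈ report, m ≤ l.toList.length) :
    ∀ (ks : List Nat), (∀ k ∈ ks, k < m) → ∀ acc : List Char,
    (ks.map (fun (k : Nat) => (k : Int))).foldl
      (fun acc pos =>
        match acc with
        | none => none
        | some eps =>
          match most_common_value_at_pos report pos with
          | none => none
          | some m => some (eps ++ (if m == "1" then ['0'] else ['1'])))
      (some acc)
      = some (acc ++ ks.map (pvChar report)) := by
  intro ks
  induction ks with
  | nil => intro _ acc; simp
  | cons k rest ih =>
    intro hk acc
    have hkm : k < m := hk k (List.mem_cons_self ..)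
    have hkl : ∀ l ∈ report, k < l.toList.length :=
      fun l hl => lt_of_lt_of_le hkm (h l hl)
    rw [List.map_cons, List.foldl_cons, mcvap_eq report k hkl]
    have step : (if pvZ report k > report.length - pvZ report k then "0"
            else if report.length - pvZ report k > pvZ report k then "1" else "tie") == "1"
          ↔ report.length - pvZ report k > pvZ report k := by
      split_ifs with h1 h2 <;> simp_all <;> omega
    by_cases hc : report.length - pvZ report k > pvZ report k
    · have : (if pvZ report k > report.length - pvZ report k then "0"
            else if report.length - pvZ report k > pvZ report k then "1" else "tie") == "1" := step.mpr hc
      simp only [this, if_true]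
      rw [ih (fun x hx => hk x (List.mem_cons_of_mem _ hx)) (acc ++ ['0'])]
      simp [pvChar, hc]
    · have : ¬ ((if pvZ report k > report.length - pvZ report k then "0"
            else if report.length - pvZ report k > pvZ report k then "1" else "tie") == "1") := fun hx => hc (step.mp hx)
      simp only [Bool.not_eq_true] at this
      simp only [this, Bool.false_eq_true, if_false]
      rw [ih (fun x hx => hk x (List.mem_cons_of_mem _ hx)) (acc ++ ['1'])]
      simp [pvChar, hc]

-- pvBump on a count table written as a map over range: each entry gains the
-- indicator of the line's character at its position
theorem pvBump_range (m : Nat) : ∀ (cs : List Char) (g : Nat → Nat), m ≤ cs.length →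
    pvBump ((List.range m).map g) cs
      = some ((List.range m).map (fun k => if cs.getD k ' ' == '0' then g k + 1 else g k)) := by
  induction m with
  | zero => intro cs g _; simp [pvBump]
  | succ m ih =>
    intro cs g hlen
    cases cs with
    | nil => simp at hlen
    | cons c rest =>
      rw [List.range_succ_eq_map, List.map_cons, List.map_map, pvBump,
        ih rest (g ∘ Nat.succ) (by simpa using hlen)]
      simp only [List.range_succ_eq_map, List.map_cons, List.map_map]
      rfl

-- the counting pass over the report: starting table g, final table g + pvZ
theorem fold_counts (m : Nat) : ∀ (report : List String) (g : Nat → Nat),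
    (∀ l ∈ report, m ≤ l.toList.length) →
    report.foldl
        (fun acc line =>
          match acc with
          | none => none
          | some counts => pvBump counts line.toList)
        (some ((List.range m).map g))
      = some ((List.range m).map (fun k => g k + pvZ report k)) := by
  intro report
  induction report with
  | nil => intro g _; simp [pvZ]
  | cons l rest ih =>
    intro g h
    rw [List.foldl_cons]
    dsimp only
    rw [pvBump_range m l.toList g (h l (List.mem_cons_self ..)),
      
      ih (fun k => if l.toList.getD k ' ' == '0' then g k + 1 else g k)
        (fun x hx => h x (List.mem_cons_of_mem _ hx))]
    refine congrArg some (List.map_congr_left (fun k hk => ?_))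
    have hkl : k < l.toList.length := lt_of_lt_of_le (List.mem_range.mp hk) (h l (List.mem_cons_self ..))
    simp only [pvZ, List.countP_cons, List.getD_eq_getElem?_getD, List.getElem?_eq_getElem hkl]
    by_cases h0 : l.toList[k] = '0' <;> simp [h0] <;> omega

theorem calculate_epsilon_spec : Claim_equal_calculate_epsilon := by
  intro report _ hpre
  unfold Spec_calculate_epsilon
  obtain ⟨hne, hlen⟩ := hpre
  obtain ⟨f, rest, rfl⟩ := List.exists_cons_of_ne_nil hne
  have hlen' : ∀ l ∈ f :: rest, f.toList.length ≤ l.toList.length := by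
    intro l hl
    have h1 := hlen l hl
    simp only [List.headD_cons, PySem.Str.len_eq] at h1
    omega
  set m := f.toList.length with hm
  unfold calculate_epsilon calculate_epsilon_alt
  rw [PySem.List.pyGet?_zero_cons]
  simp only [PySem.Str.len_eq, ← hm, PySem.List.pyRange_zero_nat, Int.toNat_natCast]
  rw [foldA (f :: rest) m hlen' (List.range m) (fun k hk => List.mem_range.mp hk) []]
  have hinit : List.replicate m (0 : Nat) = (List.range m).map (fun _ => 0) := by
    simp [List.map_const']
  rw [hinit, fold_counts m (f :: rest) (fun _ => 0) hlen']
  simp only [Nat.zero_add, List.nil_append]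
  rw [PySem.List.foldl_append_singleton_eq_map, List.map_map]
  refine congrArg String.ofList (List.map_congr_left (fun k _ => ?_))
  simp [pvChar]
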